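-- pv_equiv track=rewrite | github.com/gfreundt/pythonCode | Codewars/alphabeticanagrams2.py | elegant
-- ===== SOURCE A (Python) =====
-- from math import factorial
--
-- def elegant(word):
--     repetitions = [factorial(word.count(i)) for i in set(word)]
--     q = 1
--     for c in repetitions:
--         q *= c
--     total_words = factorial(len(word)) / q
--
--     accum = 0
--     multipliers = [factorial(i) for i in range(len(word) - 1, 0, -1)] + [0]
--     remaining_letters = sorted(word)
--
--     # adding positions
--     for k, w in enumerate(word):
--         value = remaining_letters.index(w)
--         accum += value * multipliers[k]
--         remaining_letters.remove(w)
--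
--     # substracting positions for repeated letters
--
--     return accum + 1
-- ===== SOURCE B (Python) =====
-- def elegant(word):
--     # Rank via a single right-to-left pass: keep a frequency table of the letters
--     # already seen (the suffix), count how many of them are smaller than the
--     # current letter, and grow the factorial multiplier incrementally.
--     accum = 0
--     seen = {}
--     fact = 1
--     m = 0
--     for w in reversed(word):
--         smaller = sum(v for c, v in seen.items() if c < w)
--         accum += smaller * fact
--         seen[w] = seen.get(w, 0) + 1
--         m += 1
--         fact *= m
--     return accum + 1
-- ===== Notes on version B (the rewrite author's own statement) =====
-- stated objective: alternative
-- what changed: Single right-to-left pass keeping a letter-frequency dict (counting how many already-seen suffix letters are smaller) and an incrementally grown factorial multiplier, replacing A's per-position index/remove scans over a sorted copy and its precomputed factorial list; Pre_ excludes only the words whose distinct-anagram count reaches 2^1024, where A's unused float division of the two factorial products raises OverflowError before returning.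
import Mathlib
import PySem

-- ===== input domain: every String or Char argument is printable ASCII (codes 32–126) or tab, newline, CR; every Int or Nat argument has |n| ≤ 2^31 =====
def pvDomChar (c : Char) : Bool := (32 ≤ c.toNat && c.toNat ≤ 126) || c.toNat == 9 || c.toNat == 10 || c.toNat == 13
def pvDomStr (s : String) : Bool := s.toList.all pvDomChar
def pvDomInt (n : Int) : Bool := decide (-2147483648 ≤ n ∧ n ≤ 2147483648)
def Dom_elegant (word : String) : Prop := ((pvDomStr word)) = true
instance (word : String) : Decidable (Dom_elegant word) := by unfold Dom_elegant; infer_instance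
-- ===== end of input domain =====

-- B replaces A's per-position list.index/list.remove scans over a sorted copy by one
-- right-to-left pass with a letter-frequency dict and an incrementally grown factorial.

-- ===== PORT A =====
def elegant (word : String) : Int :=
  let wl := word.toList
  let repetitions := (PySem.Set.ofList wl).map (fun c => (Nat.factorial (wl.count c) : Int))
  let _q := repetitions.foldl (fun a b => a * b) 1
  -- A's next statement divides factorial(len(word)) by q with float division and never uses
  -- the result; its only observable effect is an OverflowError on huge quotients (excluded
  -- by Pre_), so the float value itself is not ported
  let n : Int := PySem.List.len wl
  let multipliers := (PySem.List.pyRange (n - 1) 0 (-1)).map (fun i => (Nat.factorial i.toNat : Int)) ++ [(0 : Int)]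
  let st := (PySem.List.enumerate wl 0).foldl
      (fun (st : Int × List Char) kw =>
        -- value = remaining_letters.index(w): w is always present, ValueError unreachable
        -- multipliers[k]: k < len(multipliers) always, IndexError unreachable
        (st.1 + (((PySem.List.index? st.2 kw.2).getD 0 : Nat) : Int) * ((PySem.List.pyGet? multipliers kw.1).getD 0),
         (PySem.List.remove? st.2 kw.2).getD st.2))
      (0, PySem.List.sorted wl (fun x => x) false)
  st.1 + 1

-- ===== PORT B =====
def elegant_alt (word : String) : Int :=
  let st := word.toList.reverse.foldl
      (fun (st : Int × PySem.Dict Char Int × Int × Int) w =>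
        let (accum, seen, fact, m) := st
        let smaller := seen.items.foldl (fun s cv => if cv.1 < w then s + cv.2 else s) 0
        let accum := accum + smaller * fact
        let seen := seen.insert w (seen.getD w 0 + 1)
        let m := m + 1
        (accum, seen, fact * m, m))
      (0, PySem.Dict.empty, 1, 0)
  st.1 + 1

-- ===== PRECONDITION & SPEC =====
-- Pre_ excludes exactly the words whose number of distinct anagrams n!/∏(count c)! reaches
-- 2^1024 = 1797…216 (float overflow threshold, written as a literal): there A's unused float
-- division of factorial(len(word)) by the product q of the per-letter count factorials raises
-- OverflowError; A returns normally on every other word.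
def Pre_elegant (word : String) : Prop :=
  Nat.factorial word.toList.length /
    ((PySem.Set.ofList word.toList).map (fun c => Nat.factorial (word.toList.count c))).foldl (· * ·) 1
    < 179769313486231590772930519078902473361797697894230657273430081157732675805500963132708477322407536021120113879871393357658789768814416622492847430639474124377767893424865485276302219601246094119453082952085005768838150682342462881473913110540827237163350510684586298239947245938479716304835356329624224137216
instance (word : String) : Decidable (Pre_elegant word) := by unfold Pre_elegant; infer_instance

def pvWitness_elegant : String := "BOOKKEEPER"

def Spec_elegant (word : String) (out : Int) : Prop := out = elegant_alt word
instance (word : String) (out : Int) : Decidable (Spec_elegant word out) := by unfold Spec_elegant; infer_instance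

-- ===== CLAIM (what is proved, stated in full; the proofs are below) =====
def Claim_equal_elegant : Prop := ∀ (word : String), Dom_elegant word → Pre_elegant word → Spec_elegant word (elegant word)

-- ===== LEMMAS AND PROOFS =====

-- The common reference value: Σ_k (#{j>k : word[j] < word[k]}) · (n-1-k)!
def refRank : List Char → Int
  | [] => 0
  | w :: t => (t.countP (fun x => decide (x < w)) : Int) * (Nat.factorial t.length : Int) + refRank t

-- first index of w in a sorted list = number of elements smaller than w
lemma index_sorted (w : Char) : ∀ (rem : List Char), rem.Pairwise (· ≤ ·) → w ∈ rem →
    PySem.List.index? rem w = some (rem.countP (fun x => decide (x < w))) := by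
  intro rem
  induction rem with
  | nil => intro _ h; simp at h
  | cons r rs ih =>
    intro hsort hmem
    rcases List.pairwise_cons.mp hsort with ⟨hle, hsort'⟩
    by_cases hr : r = w
    · subst hr
      rw [PySem.List.index?_cons_self]
      have h0 : rs.countP (fun x => decide (x < r)) = 0 := by
        rw [List.countP_eq_zero]
        intro x hx
        simpa using not_lt.mpr (hle x hx)
      simp [h0]
    · have hmem' : w ∈ rs := by
        rcases List.mem_cons.mp hmem with h | h
        · exact absurd h.symm hr
        · exact h
      rw [PySem.List.index?_cons_of_ne _ hr, ih hsort' hmem']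
      have hrw : r < w := lt_of_le_of_ne (hle w hmem') hr
      simp [hrw]

-- the multipliers list of A: entry k (0 ≤ k < n-1) is (n-1-k)!
lemma mult_get (n k : Int) (h0 : 0 ≤ k) (h1 : k < n - 1) :
    (PySem.List.pyGet? ((PySem.List.pyRange (n - 1) 0 (-1)).map (fun i => (Nat.factorial i.toNat : Int)) ++ [(0 : Int)]) k).getD 0
      = (Nat.factorial (n - 1 - k).toNat : Int) := by
  rw [PySem.List.pyRange_neg_one, List.map_map, PySem.List.pyGet?_of_nonneg _ h0]
  have hk : k.toNat < (n - 1 - 0).toNat := by omega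
  rw [List.getElem?_append_left (by simpa using hk), List.getElem?_map, List.getElem?_range hk]
  have h2 : n - 1 - max k 0 = n - 1 - k := by omega
  simp [h2]

-- A's loop, generalized over the remaining state
lemma A_loop (n : Int) (mult : List Int)
    (hmult : ∀ k : Int, 0 ≤ k → k < n - 1 →
      (PySem.List.pyGet? mult k).getD 0 = (Nat.factorial (n - 1 - k).toNat : Int)) :
    ∀ (l rem : List Char) (s accum : Int), rem.Perm l → rem.Pairwise (· ≤ ·) →
      0 ≤ s → s + l.length = n →
    ((PySem.List.enumerate l s).foldl
      (fun (st : Int × List Char) kw =>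
        (st.1 + (((PySem.List.index? st.2 kw.2).getD 0 : Nat) : Int) * ((PySem.List.pyGet? mult kw.1).getD 0),
         (PySem.List.remove? st.2 kw.2).getD st.2))
      (accum, rem)).1 = accum + refRank l := by
  intro l
  induction l with
  | nil => intro rem s accum _ _ _ _; simp [PySem.List.enumerate, refRank]
  | cons w t ih =>
    intro rem s accum hperm hsort hs0 hs
    rw [PySem.List.enumerate_cons, List.foldl_cons]
    have hwrem : w ∈ rem := hperm.mem_iff.mpr (List.mem_cons_self)
    have hidx := index_sorted w rem hsort hwrem
    have hrem : PySem.List.remove? rem w = some (rem.erase w) :=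
      PySem.List.remove?_eq_some_erase rem w hwrem
    have hcnt : rem.countP (fun x => decide (x < w)) = t.countP (fun x => decide (x < w)) := by
      rw [hperm.countP_eq]; simp
    have hperm' : (rem.erase w).Perm t := by
      have := hperm.erase w
      simpa using this
    have hsort' : (rem.erase w).Pairwise (· ≤ ·) :=
      List.Pairwise.sublist (List.erase_sublist) hsort
    rw [hidx, hrem]
    simp only [Option.getD_some]
    cases t with
    | nil =>
      -- last position: the multiplier is the appended 0, but the index is 0 too
      have : rem.countP (fun x => decide (x < w)) = 0 := by simpa using hcnt
      simp [this, PySem.List.enumerate, refRank]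
    | cons u t' =>
      have hlt : s < n - 1 := by
        have := hs; simp [List.length_cons] at this; omega
      rw [ih (rem.erase w) (s + 1) _ hperm' hsort' (by omega) (by simp at hs ⊢; omega)]
      rw [hmult s hs0 hlt, hcnt]
      have hfac : (n - 1 - s).toNat = (u :: t').length := by
        simp at hs ⊢; omega
      rw [hfac]
      show _ = accum + refRank (w :: u :: t')
      simp only [refRank]
      ring

-- sum over the seen-counter of the counts of letters smaller than w = countP
lemma sum_items_lt (p : List Char) (w : Char) :
    (PySem.Dict.counter p).items.foldl (fun s cv => if cv.1 < w then s + cv.2 else s) 0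
      = (p.countP (fun x => decide (x < w)) : Int) := by
  rw [PySem.Dict.items_counter, List.foldl_map,
      PySem.List.foldl_ite_eq_foldl_filter (fun k => k < w) (fun s k => s + (p.count k : Int)),
      PySem.List.foldl_add]
  have hp : (PySem.Set.ofList p).Perm p.dedup := by
    apply (List.perm_ext_iff_of_nodup (PySem.Set.nodup_ofList p) p.nodup_dedup).mpr
    intro a; rw [PySem.Set.mem_ofList, List.mem_dedup]
  have hperm : (((PySem.Set.ofList p).filter (fun k => decide (k < w))).map (fun k => (p.count k : Int))).Perm
      ((p.dedup.filter (fun k => decide (k < w))).map (fun k => (p.count k : Int))) :=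
    (hp.filter _).map _
  rw [hperm.sum_eq]
  have := List.sum_map_count_dedup_filter_eq_countP (fun k => decide (k < w)) p
  have hcast : ((p.dedup.filter (fun k => decide (k < w))).map (fun k => (p.count k : Int))).sum
      = (((p.dedup.filter (fun k => decide (k < w))).map (fun k => p.count k)).sum : Int) := by
    induction (p.dedup.filter (fun k => decide (k < w))) with
    | nil => simp
    | cons a l ihl => simp [ihl]
  rw [hcast, this]
  simp

-- B's loop: full state after consuming (reversed) t
lemma B_loop : ∀ t : List Char,
    t.reverse.foldl
      (fun (st : Int × PySem.Dict Char Int × Int × Int) w =>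
        let (accum, seen, fact, m) := st
        let smaller := seen.items.foldl (fun s cv => if cv.1 < w then s + cv.2 else s) 0
        let accum := accum + smaller * fact
        let seen := seen.insert w (seen.getD w 0 + 1)
        let m := m + 1
        (accum, seen, fact * m, m))
      (0, PySem.Dict.empty, 1, 0)
    = (refRank t, PySem.Dict.counter t.reverse, (Nat.factorial t.length : Int), (t.length : Int)) := by
  intro t
  induction t with
  | nil => simp [refRank, PySem.Dict.counter]
  | cons w t ih =>
    rw [List.reverse_cons, List.foldl_append, ih]
    simp only [List.foldl_cons, List.foldl_nil]
    have hsum := sum_items_lt t.reverse w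
    have hcnt : t.reverse.countP (fun x => decide (x < w)) = t.countP (fun x => decide (x < w)) := by
      exact t.reverse_perm.countP_eq _
    have hseen : (PySem.Dict.counter t.reverse).insert w ((PySem.Dict.counter t.reverse).getD w 0 + 1)
        = PySem.Dict.counter (w :: t).reverse := by
      rw [← PySem.Dict.foldl_insert_getD_add_one_eq_counter,
          ← PySem.Dict.foldl_insert_getD_add_one_eq_counter,
          List.reverse_cons, List.foldl_append]
      simp
    rw [hsum, hcnt, hseen]
    refine Prod.ext ?_ (Prod.ext ?_ (Prod.ext ?_ ?_))
    · show _ = refRank (w :: t)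
      simp only [refRank]; ring
    · show PySem.Dict.counter (w :: t).reverse = _
      rw [List.reverse_cons]
    · show (Nat.factorial t.length : Int) * ((t.length : Int) + 1) = ((w :: t).length.factorial : Int)
      simp only [List.length_cons, Nat.factorial_succ]; push_cast; ring
    · simp

lemma elegant_eq_refRank (word : String) : elegant word = refRank word.toList + 1 := by
  unfold elegant
  simp only [PySem.List.len_eq]
  rw [A_loop ((word.toList.length : Nat) : Int) _
      (fun k h0 h1 => mult_get _ k h0 h1)
      word.toList (PySem.List.sorted word.toList (fun x => x) false) 0 0
      (PySem.List.sorted_perm word.toList (fun x => x) false)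
      (by simpa using PySem.List.sorted_pairwise word.toList (fun x => x))
      le_rfl (by simp)]
  simp

lemma elegant_alt_eq_refRank (word : String) : elegant_alt word = refRank word.toList + 1 := by
  unfold elegant_alt
  rw [B_loop word.toList]

-- ===== VERDICT (by name: the statement is the Claim_ definition above) =====
theorem elegant_spec : Claim_equal_elegant := by
  intro word _ _
  unfold Spec_elegant
  rw [elegant_eq_refRank, elegant_alt_eq_refRank]
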